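-- pv_equiv track=rewrite | github.com/20210805jiwoo/Programmers | [PCCP 실전 모의고사1]/Q1(외톨이 알파벳).py | solution
-- ===== SOURCE A (Python) =====
-- def solution(input_string):
--     answer = ''
--
--     str_list = [input_string[0]] # 리스트 생성, 첫 번째 문자 리스트에 추가
--     for i in input_string: # 문자열 순회하면서
--         if i != str_list[-1]: # 한 문자가 연속적으로 나타난 경우 제거
--             str_list.append(i)
--
--     ans = set(str_list) # 중복 제거 위해 set 자료형으로 변환
--     ans = sorted(ans) # 알파벳 순으로 정렬
--
--     for i in ans:
--         cnt = 0
--         for j in str_list: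
--             if i==j:
--                 cnt += 1
--         if cnt > 1:
--             answer += i
--     if answer == '':
--         answer += 'N'
--
--     return answer
-- ===== SOURCE B (Python) =====
-- def solution(input_string):
--     seen = set()
--     lonely = set()
--     prev = None
--     for c in input_string:
--         if c != prev:
--             if c in seen:
--                 lonely.add(c)
--             else:
--                 seen.add(c)
--             prev = c
--     return ''.join(sorted(lonely)) if lonely else 'N'
-- ===== Notes on version B (the rewrite author's own statement) =====
-- stated objective: faster
-- what changed: A builds the run-compressed list, dedups it into a sorted set and rescans the whole list once per distinct letter counting occurrences; B never builds a run list or any count: a single streaming pass keeps a set of letters that have started a run and moves a letter into a second (answer) set the moment a second run of it starts, then sorts that answer set.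
import Mathlib
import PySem

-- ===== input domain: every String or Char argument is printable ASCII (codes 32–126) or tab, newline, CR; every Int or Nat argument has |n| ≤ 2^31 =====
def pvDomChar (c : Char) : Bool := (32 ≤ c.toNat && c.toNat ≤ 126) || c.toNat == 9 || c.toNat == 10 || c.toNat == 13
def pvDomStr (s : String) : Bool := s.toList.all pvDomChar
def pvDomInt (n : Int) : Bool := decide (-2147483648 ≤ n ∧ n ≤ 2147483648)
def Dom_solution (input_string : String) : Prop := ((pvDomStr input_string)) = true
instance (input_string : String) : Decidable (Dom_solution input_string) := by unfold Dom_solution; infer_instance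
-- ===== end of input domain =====

-- B drops A's run list and counting entirely: one streaming pass keeps a `seen` set of
-- run-start letters and moves a letter to `lonely` the moment a second run of it starts
-- (objective: faster — no per-letter rescan of the run list). A raises IndexError on "",
-- excluded by Pre_ (B happens to return 'N' there).

-- ===== PORT A =====
-- run-compressed list, then for each sorted distinct letter rescan the list counting
def solutionChars (s : List Char) : List Char :=
  match s with
  | [] => []   -- unreachable: input_string[0] raises IndexError on "", excluded by Pre_solution
  | c0 :: _ =>
    let strList := s.foldl (fun acc i => if i != acc.getLast! then acc ++ [i] else acc) [c0]
    let ans := PySem.List.sorted (PySem.Set.ofList strList) (fun x => x)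
    let answer := ans.foldl (fun answer i =>
      let cnt := strList.foldl (fun cnt j => if i == j then cnt + 1 else cnt) (0 : Int)
      if cnt > 1 then answer ++ [i] else answer) ([] : List Char)
    if answer = [] then ['N'] else answer

def solution (input_string : String) : String :=
  String.ofList (solutionChars input_string.toList)

-- ===== PORT B =====
-- one pass: `seen` = letters that have started a run, `lonely` = letters whose second run started
def bstep (st : PySem.Set Char × PySem.Set Char × Option Char) (c : Char) :
    PySem.Set Char × PySem.Set Char × Option Char :=
  if some c != st.2.2 then
    if PySem.Set.contains st.1 c then (st.1, PySem.Set.add st.2.1 c, some c)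
    else (PySem.Set.add st.1 c, st.2.1, some c)
  else st

def solutionAltChars (s : List Char) : List Char :=
  let st := s.foldl bstep (PySem.Set.empty, PySem.Set.empty, none)
  if st.2.1 = [] then ['N'] else PySem.List.sorted st.2.1 (fun x => x)

def solution_alt (input_string : String) : String :=
  String.ofList (solutionAltChars input_string.toList)

-- ===== PRECONDITION & SPEC =====
-- Pre_ excludes only the empty string, on which A raises IndexError at input_string[0].
def Pre_solution (input_string : String) : Prop := input_string ≠ ""
instance (input_string : String) : Decidable (Pre_solution input_string) := by unfold Pre_solution; infer_instance
def pvWitness_solution : String := "aabba"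

def Spec_solution (input_string : String) (out : String) : Prop := out = solution_alt input_string
instance (input_string : String) (out : String) : Decidable (Spec_solution input_string out) := by unfold Spec_solution; infer_instance

-- ===== CLAIM (what is proved, stated in full; the proofs are below) =====
def Claim_equal_solution : Prop := ∀ (input_string : String), Dom_solution input_string → Pre_solution input_string → Spec_solution input_string (solution input_string)

-- ===== LEMMAS AND PROOFS =====

-- getLast! agrees with getLast? on nonempty lists
lemma glast (as : List Char) (last : Char) (h : as.getLast? = some last) : as.getLast! = last := by
  cases as with
  | nil => simp at h
  | cons a t =>
    have h2 := (List.getLast?_eq_some_getLast (l := a::t) (by simp)).symm.trans h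
    simp only [List.getLast!]
    exact Option.some.inj h2

-- invariant of B's single pass against A's run-compression fold:
-- prev tracks the last run letter, seen holds exactly the letters of the run list,
-- lonely exactly those with at least two runs; both stay duplicate-free
lemma loop_inv (l : List Char) : ∀ (seen lonely R : List Char) (last : Char),
    R.getLast? = some last → seen.Nodup → lonely.Nodup →
    (∀ x, x ∈ seen ↔ x ∈ R) → (∀ x, x ∈ lonely ↔ 2 ≤ R.count x) →
    (l.foldl bstep (seen, lonely, some last)).2.2
        = (l.foldl (fun acc i => if i != acc.getLast! then acc ++ [i] else acc) R).getLast? ∧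
    (l.foldl bstep (seen, lonely, some last)).2.1.Nodup ∧
    (∀ x, x ∈ (l.foldl bstep (seen, lonely, some last)).2.1
        ↔ 2 ≤ (l.foldl (fun acc i => if i != acc.getLast! then acc ++ [i] else acc) R).count x) := by
  induction l with
  | nil => intro seen lonely R last h _ hs2 _ hl2; exact ⟨h.symm, hs2, hl2⟩
  | cons c l ih =>
    intro seen lonely R last hlast hns hnl hseen hlonely
    simp only [List.foldl_cons]
    by_cases hc : c = last
    · have hb : (some c != some last) = false := by simp [hc]
      have hb2 : (c != R.getLast!) = false := by rw [glast R last hlast]; simp [hc]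
      simp only [bstep, hb, Bool.false_eq_true, if_false, hb2]
      exact ih seen lonely R last hlast hns hnl hseen hlonely
    · have hb : (some c != some last) = true := by simp [hc]
      have hb2 : (c != R.getLast!) = true := by rw [glast R last hlast]; simp [hc]
      simp only [bstep, hb, if_true, hb2]
      have hcont : PySem.Set.contains seen c = decide (c ∈ R) := by
        simp [PySem.Set.contains, hseen c]
      by_cases hm : c ∈ R
      · simp only [hcont, hm, decide_true, if_true]
        apply ih (seen) (PySem.Set.add lonely c) (R ++ [c]) c (by simp) hns
          (PySem.Set.nodup_add lonely c hnl)
        · intro x; rw [hseen x]; constructor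
          · intro hx; exact List.mem_append_left _ hx
          · intro hx
            rcases List.mem_append.mp hx with hx | hx
            · exact hx
            · simp at hx; subst hx; exact hm
        · intro x
          rw [PySem.Set.mem_add, hlonely x, List.count_append]
          by_cases hxc : x = c
          · subst hxc
            have : 1 ≤ R.count x := List.count_pos_iff.mpr hm
            simp; omega
          · have h1 : List.count x [c] = 0 := by simp [List.count_cons]; exact fun h => hxc h.symm
            simp [h1, hxc]
      · simp only [hcont, hm, decide_false, Bool.false_eq_true, if_false]
        apply ih (PySem.Set.add seen c) lonely (R ++ [c]) c (by simp)
          (PySem.Set.nodup_add seen c hns) hnl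
        · intro x
          rw [PySem.Set.mem_add, hseen x, List.mem_append]
          simp
        · intro x
          rw [hlonely x, List.count_append]
          by_cases hxc : x = c
          · subst hxc
            have h0 : R.count x = 0 := by
              by_contra h; exact hm (List.count_pos_iff.mp (Nat.pos_of_ne_zero h))
            simp [h0]
          · have h1 : List.count x [c] = 0 := by simp [List.count_cons]; exact fun h => hxc h.symm
            simp [h1]

-- filtering a sorted distinct list = sorting the filtered distinct list
lemma sorted_filter_comm (q : Char → Bool) (xs : List Char) :
    PySem.List.sorted ((PySem.Set.ofList xs).filter q) (fun x => x)
      = (PySem.List.sorted (PySem.Set.ofList xs) (fun x => x)).filter q := by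
  apply PySem.List.sorted_eq_of_perm_of_pairwise_lt
  · exact ((PySem.List.sorted_perm _ _ _).filter q)
  · exact (PySem.List.sorted_ofList_pairwise_lt xs).sublist List.filter_sublist

lemma chars_eq (c0 : Char) (rest : List Char) :
    solutionChars (c0 :: rest) = solutionAltChars (c0 :: rest) := by
  unfold solutionChars solutionAltChars
  dsimp only
  -- the first iteration of A's compression loop is a no-op (c0 == str_list[-1])
  have h0 : (c0 :: rest).foldl (fun acc i => if i != acc.getLast! then acc ++ [i] else acc) [c0]
      = rest.foldl (fun acc i => if i != acc.getLast! then acc ++ [i] else acc) [c0] := by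
    simp only [List.foldl_cons]
    congr 1
    rw [glast [c0] c0 (by simp)]
    simp
  -- B's first iteration puts c0 into seen and sets prev
  have hB0 : bstep (PySem.Set.empty, PySem.Set.empty, none) c0 = ([c0], [], some c0) := by
    simp [bstep, PySem.Set.contains, PySem.Set.add, PySem.Set.empty]
  rw [h0]
  simp only [List.foldl_cons, hB0]
  obtain ⟨hprev, hnl, hmem⟩ := loop_inv rest [c0] [] [c0] c0 (by simp) (by simp) (by simp)
    (by intro x; simp)
    (by intro x
        have h := List.count_le_length (a := x) (l := [c0])
        simp only [List.not_mem_nil, false_iff, List.length_cons, List.length_nil] at *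
        omega)
  set st := rest.foldl bstep ([c0], [], some c0) with hst
  set L := rest.foldl (fun acc i => if i != acc.getLast! then acc ++ [i] else acc) [c0] with hL
  -- A's per-letter counting loop is just the count in L
  have hfun : (fun (answer : List Char) (i : Char) =>
        if (L.foldl (fun cnt j => if i == j then cnt + 1 else cnt) (0 : Int)) > 1
        then answer ++ [i] else answer)
      = (fun answer i => if (fun i => decide ((1:Int) < (List.count i L : Int))) i = true
        then answer ++ [id i] else answer) := by
    funext ans i
    rw [PySem.List.foldl_count_if]
    have hcnt : List.countP (fun j => i == j) L = List.count i L := by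
      simp [List.count_eq_countP, Bool.beq_comm]
    simp [hcnt]
  simp only [hfun]
  rw [PySem.List.foldl_append_if, List.map_id, ← sorted_filter_comm]
  -- B's lonely set is a permutation of A's filtered distinct-run list
  have hperm : ((PySem.Set.ofList L).filter (fun i => decide ((1:Int) < (List.count i L : Int)))).Perm st.2.1 := by
    rw [List.perm_ext_iff_of_nodup ((PySem.Set.nodup_ofList L).filter _) hnl]
    intro x
    rw [List.mem_filter, PySem.Set.mem_ofList, hmem x]
    constructor
    · intro ⟨_, h⟩; simp at h; omega
    · intro h
      refine ⟨List.count_pos_iff.mp (by omega), ?_⟩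
      simp; omega
  have hsorted : PySem.List.sorted ((PySem.Set.ofList L).filter (fun i => decide ((1:Int) < (List.count i L : Int)))) (fun x => x)
      = PySem.List.sorted st.2.1 (fun x => x) :=
    PySem.List.sorted_eq_sorted_of_perm _ _ _ (fun a b h => h) hperm
  rw [hsorted]
  -- the two emptiness tests agree
  by_cases hnil : st.2.1 = []
  · simp [hnil, PySem.List.sorted]
  · have h1 : PySem.List.sorted st.2.1 (fun x => x) ≠ [] := by
      rw [Ne, PySem.List.sorted_eq_nil_iff]; exact hnil
    simp [hnil, h1]

-- ===== VERDICT (by name: the statement is the Claim_ definition above) =====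
theorem solution_spec : Claim_equal_solution := by
  intro s _ hpre
  unfold Spec_solution solution solution_alt
  cases h : s.toList with
  | nil => exact absurd (String.toList_eq_nil_iff.mp h) hpre
  | cons c0 rest => rw [chars_eq]
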